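-- pv_equiv track=rewrite | github.com/knowzek/gpt-lead-autoresponder | mazda_loyalty_sms_brain.py | _thread_has_handoff_started
-- ===== SOURCE A (Python) =====
-- def _thread_to_text(thread_snippet: list[dict] | None, max_msgs: int = 8) -> str:
--     if not thread_snippet:
--         return ""
--
--     lines = []
--     for m in thread_snippet[-max_msgs:]:
--         role = (m.get("role") or "").strip().lower()
--         content = (m.get("content") or "").strip()
--         if not content:
--             continue
--         who = "Customer" if role == "user" else "Patti"
--         lines.append(f"{who}: {content}")
--
--     return "\n".join(lines).strip()
--
-- def _thread_has_handoff_started(thread_snippet: list[dict] | None) -> bool: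
--     t = _thread_to_text(thread_snippet).lower()
--     if not t:
--         return False
--     return any(x in t for x in (
--         "i’m looping in a team member",
--         "i'm looping in a team member",
--         "team member to help with that",
--         "team member now to confirm eligibility",
--         "what day/time were you hoping for",
--         "what day works best, and about what time",
--     ))
-- ===== SOURCE B (Python) =====
-- _HANDOFF_PHRASES = (
--     "i\u2019m looping in a team member",
--     "i'm looping in a team member",
--     "team member to help with that",
--     "team member now to confirm eligibility",
--     "what day/time were you hoping for",
--     "what day works best, and about what time",
-- )
--
-- def _thread_has_handoff_started(thread_snippet: list[dict] | None) -> bool: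
--     if not thread_snippet:
--         return False
--     for m in thread_snippet[-8:]:
--         content = (m.get("content") or "").strip().lower()
--         if content and any(p in content for p in _HANDOFF_PHRASES):
--             return True
--     return False
-- ===== Notes on version B (the rewrite author's own statement) =====
-- stated objective: simpler
-- what changed: B drops the _thread_to_text helper entirely: instead of building the joined 'Customer:/Patti:' transcript (roles, prefixes, newline join, strip) and searching that one string, it scans the last 8 messages and tests each stripped-lowercased content directly for the six phrases, returning at the first hit; roles are never read.
import Mathlib
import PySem

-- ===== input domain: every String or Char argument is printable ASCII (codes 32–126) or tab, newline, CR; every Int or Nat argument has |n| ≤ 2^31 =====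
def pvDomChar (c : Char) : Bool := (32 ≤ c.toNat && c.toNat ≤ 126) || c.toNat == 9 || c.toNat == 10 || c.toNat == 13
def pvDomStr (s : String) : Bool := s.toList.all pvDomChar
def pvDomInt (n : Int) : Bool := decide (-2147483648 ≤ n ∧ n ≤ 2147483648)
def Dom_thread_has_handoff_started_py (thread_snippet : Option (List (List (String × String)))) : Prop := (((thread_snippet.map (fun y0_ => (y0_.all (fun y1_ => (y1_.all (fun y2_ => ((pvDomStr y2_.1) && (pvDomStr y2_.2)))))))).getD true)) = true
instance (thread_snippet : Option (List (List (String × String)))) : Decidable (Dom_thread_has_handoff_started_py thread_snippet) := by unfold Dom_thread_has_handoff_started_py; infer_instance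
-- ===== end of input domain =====

-- B scans the last 8 messages directly, testing each stripped-lowercased content for the
-- phrases, instead of building A's joined "Customer:/Patti:" transcript and searching it
-- (objective: simpler — no intermediate text, the role is never read).

-- ===== PORT A =====
-- helper: _thread_to_text(thread_snippet, max_msgs=8)
def pvThreadToText (thread_snippet : Option (List (List (String × String)))) (max_msgs : Int) : String :=
  match thread_snippet with
  | none => ""   -- `if not thread_snippet: return ""`
  | some xs =>
    if xs = [] then ""
    else
      -- for m in thread_snippet[-max_msgs:]: …
      let lines : List String :=
        (PySem.List.slice xs (some (-max_msgs)) none).foldl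
          (fun lines m =>
            let role := PySem.Str.lower (PySem.Str.strip (((PySem.Dict.mk m).get? "role").getD ""))
            let content := PySem.Str.strip (((PySem.Dict.mk m).get? "content").getD "")
            if content = "" then lines
            else
              let who := if role = "user" then "Customer" else "Patti"
              lines ++ [who ++ ": " ++ content]) []
      PySem.Str.strip (PySem.Str.join "\n" lines)

def thread_has_handoff_started_py (thread_snippet : Option (List (List (String × String)))) : Bool :=
  let t := PySem.Str.lower (pvThreadToText thread_snippet 8)
  if t = "" then false
  else
    [ "i’m looping in a team member",
      "i'm looping in a team member",
      "team member to help with that",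
      "team member now to confirm eligibility",
      "what day/time were you hoping for",
      "what day works best, and about what time" ].any (fun x => PySem.Str.isIn x t)

-- ===== PORT B =====
def pvHandoffPhrases : List String :=
  [ "i’m looping in a team member",
    "i'm looping in a team member",
    "team member to help with that",
    "team member now to confirm eligibility",
    "what day/time were you hoping for",
    "what day works best, and about what time" ]

def thread_has_handoff_started_py_alt (thread_snippet : Option (List (List (String × String)))) : Bool :=
  match thread_snippet with
  | none => false
  | some xs =>
    if xs = [] then false
    else
      (PySem.List.slice xs (some (-8)) none).any (fun m =>
        let content := PySem.Str.lower (PySem.Str.strip (((PySem.Dict.mk m).get? "content").getD ""))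
        content ≠ "" && pvHandoffPhrases.any (fun p => PySem.Str.isIn p content))

-- ===== PRECONDITION & SPEC =====
def Spec_thread_has_handoff_started_py (thread_snippet : Option (List (List (String × String)))) (out : Bool) : Prop := out = thread_has_handoff_started_py_alt thread_snippet
instance (thread_snippet : Option (List (List (String × String)))) (out : Bool) : Decidable (Spec_thread_has_handoff_started_py thread_snippet out) := by unfold Spec_thread_has_handoff_started_py; infer_instance

-- ===== CLAIM (what is proved, stated in full; the proofs are below) =====
def Claim_equal_thread_has_handoff_started_py : Prop := ∀ (thread_snippet : Option (List (List (String × String)))), Dom_thread_has_handoff_started_py thread_snippet → Spec_thread_has_handoff_started_py thread_snippet (thread_has_handoff_started_py thread_snippet)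

-- ===== LEMMAS AND PROOFS =====

-- abbreviations for the values both ports read off a message
def pvCnt (m : List (String × String)) : String :=
  PySem.Str.strip (((PySem.Dict.mk m).get? "content").getD "")
def pvRole (m : List (String × String)) : String :=
  PySem.Str.lower (PySem.Str.strip (((PySem.Dict.mk m).get? "role").getD ""))
def pvWho (m : List (String × String)) : String :=
  if pvRole m = "user" then "Customer" else "Patti"
def pvLine (m : List (String × String)) : String := pvWho m ++ ": " ++ pvCnt m

-- a prefix that avoids a character c stays inside the part before c
lemma pv_prefix_split {c : Char} (nd : List Char) (hc : c ∉ nd) :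
    ∀ (a b : List Char), nd <+: a ++ c :: b → nd <+: a := by
  induction nd with
  | nil => intro a b _; exact List.nil_prefix
  | cons h t ih =>
    intro a b hp
    cases a with
    | nil =>
      rw [List.nil_append, List.cons_prefix_cons] at hp
      exact absurd (hp.1 ▸ List.mem_cons_self) hc
    | cons d a' =>
      rw [List.cons_append, List.cons_prefix_cons] at hp
      exact (List.cons_prefix_cons).2 ⟨hp.1, ih (fun hm => hc (List.mem_cons_of_mem _ hm)) a' b hp.2⟩

-- an infix that avoids c lies wholly before or wholly after the c
lemma pv_infix_split {c : Char} (nd : List Char) (hc : c ∉ nd) (a b : List Char) :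
    nd <:+: a ++ c :: b ↔ nd <:+: a ∨ nd <:+: b := by
  constructor
  · intro h
    induction a with
    | nil =>
      rw [List.nil_append, List.infix_cons_iff] at h
      rcases h with h | h
      · cases nd with
        | nil => exact Or.inl (List.nil_infix)
        | cons x t =>
          rw [List.cons_prefix_cons] at h
          exact absurd (h.1 ▸ List.mem_cons_self) hc
      · exact Or.inr h
    | cons d a' ih =>
      rw [List.cons_append, List.infix_cons_iff] at h
      rcases h with h | h
      · exact Or.inl (pv_prefix_split nd hc _ b h).isInfix
      · rcases ih h with h' | h'
        · exact Or.inl (List.infix_cons h')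
        · exact Or.inr h'
  · rintro (h | h)
    · exact h.trans ⟨[], c :: b, by simp⟩
    · exact h.trans ⟨a ++ [c], [], by simp⟩

-- a non-empty infix not starting with the head character skips the head
lemma pv_infix_cons (nd : List Char) (hne : nd ≠ []) (c : Char) (hh : nd.head? ≠ some c)
    (b : List Char) : nd <:+: c :: b ↔ nd <:+: b := by
  constructor
  · intro h
    rcases List.infix_cons_iff.1 h with h | h
    · cases nd with
      | nil => exact absurd rfl hne
      | cons x t =>
        rw [List.cons_prefix_cons] at h
        exact absurd (h.1 ▸ rfl) hh
    · exact h
  · intro h; exact List.infix_cons h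

-- properties a needle must have for the per-line search to coincide with the full search
def pvNeedleOK (nd : List Char) : Prop :=
  nd ≠ [] ∧ '\n' ∉ nd ∧ ':' ∉ nd ∧ nd.head? ≠ some ' ' ∧
    ¬ nd <:+: "customer".toList ∧ ¬ nd <:+: "patti".toList

-- searching one "who: content" line is searching the content
lemma pv_line_iff (nd : List Char) (hok : pvNeedleOK nd) (w c : List Char)
    (hw : w = "customer".toList ∨ w = "patti".toList) :
    nd <:+: w ++ ':' :: ' ' :: c ↔ nd <:+: c := by
  obtain ⟨hne, -, hcol, hsp, hcu, hpa⟩ := hok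
  rw [pv_infix_split nd hcol w (' ' :: c)]
  constructor
  · rintro (h | h)
    · rcases hw with rfl | rfl
      · exact absurd h hcu
      · exact absurd h hpa
    · exact (pv_infix_cons nd hne ' ' hsp c).1 h
  · intro h; exact Or.inr ((pv_infix_cons nd hne ' ' hsp c).2 h)

-- the joined transcript contains the needle iff some content does
lemma pv_key (nd : List Char) (hok : pvNeedleOK nd) :
    ∀ (prs : List (List Char × List Char)),
      (∀ pr ∈ prs, pr.1 = "customer".toList ∨ pr.1 = "patti".toList) →
      (nd <:+: PySem.Chars.join ['\n'] (prs.map (fun pr => pr.1 ++ ':' :: ' ' :: pr.2)) ↔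
        ∃ pr ∈ prs, nd <:+: pr.2) := by
  intro prs
  induction prs with
  | nil =>
    intro _; rw [List.map_nil, PySem.Chars.join_nil, List.infix_nil]
    simp [hok.1]
  | cons pr rest ih =>
    intro hw
    have hpr := hw pr (List.mem_cons_self)
    have hrest : ∀ q ∈ rest, q.1 = "customer".toList ∨ q.1 = "patti".toList :=
      fun q hq => hw q (List.mem_cons_of_mem _ hq)
    cases rest with
    | nil =>
      rw [List.map_cons, List.map_nil, PySem.Chars.join_singleton,
        pv_line_iff nd hok pr.1 pr.2 hpr]
      simp
    | cons q qs =>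
      simp only [List.map_cons]
      rw [PySem.Chars.join_cons_cons, List.append_assoc, List.cons_append,
        List.nil_append, pv_infix_split nd hok.2.1, pv_line_iff nd hok pr.1 pr.2 hpr]
      have hih := ih hrest
      simp only [List.map_cons] at hih
      rw [hih]
      simp

-- strip is the identity on a list with non-space ends
lemma pv_strip_eq_self (l : List Char)
    (h1 : ∀ c, l.head? = some c → PySem.Chars.isspace c = false)
    (h2 : ∀ c, l.getLast? = some c → PySem.Chars.isspace c = false) :
    PySem.Chars.strip l = l := by
  have hl : PySem.Chars.lstrip l = l := by
    cases l with
    | nil => rfl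
    | cons c t =>
      simp [PySem.Chars.lstrip, h1 c rfl]
  rw [PySem.Chars.strip, hl, PySem.Chars.rstrip]
  cases hr : l.reverse with
  | nil => simp_all
  | cons c t =>
    have hc : l.getLast? = some c := by rw [← List.head?_reverse, hr]; rfl
    have hdw : List.dropWhile PySem.Chars.isspace (c :: t) = c :: t := by
      simp [h2 c hc]
    rw [hdw, ← hr, List.reverse_reverse]

-- the joined transcript of non-empty lines is non-empty
lemma pv_join_ne (l : List Char) (hl : l ≠ []) (rest : List (List Char)) :
    PySem.Chars.join ['\n'] (l :: rest) ≠ [] := by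
  cases rest with
  | nil => rw [PySem.Chars.join_singleton]; exact hl
  | cons q qs =>
    rw [PySem.Chars.join_cons_cons]
    simp [hl]

-- the last element of the joined transcript is the last element of some line
lemma pv_join_getLast? : ∀ (rest : List (List Char)) (l : List Char), l ≠ [] →
    (∀ x ∈ rest, x ≠ []) →
    ∃ m, (m = l ∨ m ∈ rest) ∧ (PySem.Chars.join ['\n'] (l :: rest)).getLast? = m.getLast? := by
  intro rest
  induction rest with
  | nil =>
    intro l hl _
    exact ⟨l, Or.inl rfl, by rw [PySem.Chars.join_singleton]⟩
  | cons q qs ih =>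
    intro l hl hr
    obtain ⟨m, hm, hlast⟩ := ih q (hr q List.mem_cons_self)
      (fun x hx => hr x (List.mem_cons_of_mem _ hx))
    have hJ : PySem.Chars.join ['\n'] (q :: qs) ≠ [] := pv_join_ne q (hr q List.mem_cons_self) qs
    obtain ⟨y, hy⟩ : ∃ y, (PySem.Chars.join ['\n'] (q :: qs)).getLast? = some y := by
      cases hg : (PySem.Chars.join ['\n'] (q :: qs)).getLast? with
      | none => exact absurd (List.getLast?_eq_none_iff.1 hg) hJ
      | some y => exact ⟨y, rfl⟩
    have key : (PySem.Chars.join ['\n'] (l :: q :: qs)).getLast? =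
        (PySem.Chars.join ['\n'] (q :: qs)).getLast? := by
      rw [PySem.Chars.join_cons_cons, List.append_assoc, List.getLast?_append]
      have h2 : (['\n'] ++ PySem.Chars.join ['\n'] (q :: qs)).getLast? = some y := by
        rw [List.getLast?_append, hy]; rfl
      rw [h2, hy]; rfl
    exact ⟨m, Or.inr (hm.elim (fun h => h ▸ List.mem_cons_self) (List.mem_cons_of_mem q)),
      key.trans hlast⟩

-- the last character of a stripped-nonempty string is not a space
lemma pv_strip_getLast (s : List Char) (c : Char)
    (hc : (PySem.Chars.strip s).getLast? = some c) : PySem.Chars.isspace c = false := by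
  rw [PySem.Chars.strip, PySem.Chars.rstrip, ← List.head?_reverse, List.reverse_reverse] at hc
  cases hd : List.dropWhile PySem.Chars.isspace (PySem.Chars.lstrip s).reverse with
  | nil => rw [hd] at hc; exact absurd hc (by simp)
  | cons x xs =>
    rw [hd] at hc
    have := List.head_dropWhile_not PySem.Chars.isspace (l := (PySem.Chars.lstrip s).reverse)
      (by rw [hd]; exact List.cons_ne_nil x xs)
    simpa [hd, List.head_cons, (by injection hc : x = c)] using this

-- lower distributes over the newline-join
lemma pv_lower_join : ∀ (parts : List (List Char)),
    PySem.Chars.lower (PySem.Chars.join ['\n'] parts) =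
      PySem.Chars.join ['\n'] (parts.map PySem.Chars.lower) := by
  intro parts
  induction parts with
  | nil => rfl
  | cons p rest ih =>
    cases rest with
    | nil => rw [List.map_cons, List.map_nil, PySem.Chars.join_singleton, PySem.Chars.join_singleton]
    | cons q qs =>
      simp only [List.map_cons]
      rw [PySem.Chars.join_cons_cons, PySem.Chars.join_cons_cons]
      have hih := ih
      simp only [List.map_cons] at hih
      rw [← hih]
      simp [PySem.Chars.lower, List.map_append,
        (by decide : PySem.Chars.lowerChar '\n' = '\n')]

-- the six phrases are valid needles
lemma pv_phrases_ok : ∀ p ∈ pvHandoffPhrases,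
    p.toList ≠ [] ∧ '\n' ∉ p.toList ∧ ':' ∉ p.toList ∧ p.toList.head? ≠ some ' ' ∧
      PySem.Chars.isIn p.toList "customer".toList = false ∧
      PySem.Chars.isIn p.toList "patti".toList = false := by decide

-- who is one of two fixed strings
lemma pv_who_cases (m : List (String × String)) :
    (pvWho m).toList = "Customer".toList ∨ (pvWho m).toList = "Patti".toList := by
  unfold pvWho; split
  · exact Or.inl rfl
  · exact Or.inr rfl

-- the line as a character list
lemma pv_line_toList (m : List (String × String)) :
    (pvLine m).toList = (pvWho m).toList ++ ':' :: ' ' :: (pvCnt m).toList := by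
  unfold pvLine
  rw [String.toList_append, String.toList_append, (by rfl : (": " : String).toList = [':', ' ']),
    List.append_assoc]
  rfl

-- a string and its PySem lowering are empty together
lemma pv_lower_eq_nil_iff (u : String) : PySem.Str.lower u = "" ↔ u = "" := by
  rw [← String.toList_eq_nil_iff, ← String.toList_eq_nil_iff, PySem.Str.toList_lower,
    PySem.Chars.lower, List.map_eq_nil_iff]

-- head of a joined transcript is the head of its first line
lemma pv_join_head? (l : List Char) (hl : l ≠ []) (rest : List (List Char)) :
    (PySem.Chars.join ['\n'] (l :: rest)).head? = l.head? := by
  cases rest with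
  | nil => rw [PySem.Chars.join_singleton]
  | cons q qs =>
    rw [PySem.Chars.join_cons_cons, List.append_assoc, List.head?_append]
    rcases List.exists_cons_of_ne_nil hl with ⟨x, l', rfl⟩
    rfl

-- a line built from a non-empty stripped content is non-empty with non-space ends
lemma pv_line_facts (m : List (String × String)) (h : pvCnt m ≠ "") :
    (pvLine m).toList ≠ [] ∧
      (∀ c, (pvLine m).toList.head? = some c → PySem.Chars.isspace c = false) ∧
      (∀ c, (pvLine m).toList.getLast? = some c → PySem.Chars.isspace c = false) := by
  have hc : (pvCnt m).toList ≠ [] := fun hh => h (String.toList_eq_nil_iff.1 hh)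
  obtain ⟨y, hy⟩ : ∃ y, (pvCnt m).toList.getLast? = some y := by
    cases hg : (pvCnt m).toList.getLast? with
    | none => exact absurd (List.getLast?_eq_none_iff.1 hg) hc
    | some y => exact ⟨y, rfl⟩
  have hyns : PySem.Chars.isspace y = false := by
    apply pv_strip_getLast ((((PySem.Dict.mk m).get? "content").getD "")).toList y
    rw [← PySem.Str.toList_strip]
    exact hy
  rw [pv_line_toList]
  refine ⟨by rcases pv_who_cases m with hw | hw <;> simp [hw], ?_, ?_⟩
  · intro c hc2
    rcases pv_who_cases m with hw | hw <;> rw [hw, List.head?_append] at hc2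
    · rw [(by decide : ("Customer".toList).head? = some 'C')] at hc2
      simp only [Option.some_or, Option.some.injEq] at hc2
      rw [← hc2]; decide
    · rw [(by decide : ("Patti".toList).head? = some 'P')] at hc2
      simp only [Option.some_or, Option.some.injEq] at hc2
      rw [← hc2]; decide
  · intro c hc2
    rw [List.getLast?_append,
      (by rfl : (':' :: ' ' :: (pvCnt m).toList) = [':', ' '] ++ (pvCnt m).toList),
      List.getLast?_append, hy] at hc2
    simp only [Option.some_or, Option.some.injEq] at hc2
    rw [← hc2]; exact hyns

-- lowering a line lowers its parts
lemma pv_line_lower (m : List (String × String)) :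
    PySem.Chars.lower ((pvLine m).toList) =
      PySem.Chars.lower ((pvWho m).toList) ++ ':' :: ' ' :: PySem.Chars.lower ((pvCnt m).toList) := by
  rw [pv_line_toList]
  simp [PySem.Chars.lower, List.map_append, (by decide : PySem.Chars.lowerChar ':' = ':'),
    (by decide : PySem.Chars.lowerChar ' ' = ' ')]

-- lowering each line exposes the lowered who/content pair
lemma pv_map_lower_lines : ∀ (good : List (List (String × String))),
    List.map PySem.Chars.lower (good.map (fun m => (pvLine m).toList)) =
      (good.map (fun m => (PySem.Chars.lower ((pvWho m).toList),
        PySem.Chars.lower ((pvCnt m).toList)))).map (fun pr => pr.1 ++ ':' :: ' ' :: pr.2) := by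
  intro good
  induction good with
  | nil => rfl
  | cons g gs ih =>
    simp only [List.map_cons]
    rw [pv_line_lower g, ih]

-- the lowered transcript, as a character list, and its non-emptiness
set_option maxHeartbeats 2000000 in
lemma pv_transcript (good : List (List (String × String)))
    (hne : ∀ m ∈ good, pvCnt m ≠ "") :
    ((PySem.Str.lower (PySem.Str.strip (PySem.Str.join "\n" (good.map pvLine)))).toList =
      PySem.Chars.join ['\n']
        ((good.map (fun m => (PySem.Chars.lower ((pvWho m).toList),
          PySem.Chars.lower ((pvCnt m).toList)))).map (fun pr => pr.1 ++ ':' :: ' ' :: pr.2))) ∧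
    (good ≠ [] →
      PySem.Str.lower (PySem.Str.strip (PySem.Str.join "\n" (good.map pvLine))) ≠ "") := by
  cases good with
  | nil => exact ⟨by decide, fun h => absurd rfl h⟩
  | cons g gs =>
    have hne' : ∀ m ∈ g :: gs, pvCnt m ≠ "" := hne
    have hfg := pv_line_facts g (hne' g List.mem_cons_self)
    have htl : (PySem.Str.join "\n" ((g :: gs).map pvLine)).toList =
        PySem.Chars.join ['\n'] ((g :: gs).map (fun m => (pvLine m).toList)) := by
      rw [PySem.Str.toList_join, (by rfl : ("\n" : String).toList = ['\n']), List.map_map]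
      rfl
    have hstrip : PySem.Chars.strip
        (PySem.Chars.join ['\n'] ((g :: gs).map (fun m => (pvLine m).toList))) =
        PySem.Chars.join ['\n'] ((g :: gs).map (fun m => (pvLine m).toList)) := by
      apply pv_strip_eq_self
      · intro c hc
        rw [List.map_cons, pv_join_head? _ hfg.1 _] at hc
        exact hfg.2.1 c hc
      · intro c hc
        obtain ⟨mline, hm, hlast⟩ := pv_join_getLast? (gs.map fun m => (pvLine m).toList)
          ((pvLine g).toList) hfg.1
          (by
            intro x hx
            obtain ⟨m', hm', rfl⟩ := List.mem_map.1 hx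
            exact (pv_line_facts m' (hne' m' (List.mem_cons_of_mem _ hm'))).1)
        rw [List.map_cons, hlast] at hc
        cases hm with
        | inl h => rw [h] at hc; exact hfg.2.2 c hc
        | inr h =>
          obtain ⟨m', hm', hx⟩ := List.mem_map.1 h
          rw [← hx] at hc
          exact (pv_line_facts m' (hne' m' (List.mem_cons_of_mem _ hm'))).2.2 c hc
    constructor
    · rw [PySem.Str.toList_lower, PySem.Str.toList_strip, htl, hstrip, pv_lower_join,
        pv_map_lower_lines]
    · intro _ hnil
      have h0 : (PySem.Str.lower (PySem.Str.strip
          (PySem.Str.join "\n" ((g :: gs).map pvLine)))).toList = [] := by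
        rw [hnil]; rfl
      rw [PySem.Str.toList_lower, PySem.Str.toList_strip, htl, hstrip, pv_lower_join,
        pv_map_lower_lines, List.map_cons, List.map_cons] at h0
      exact pv_join_ne _ (by simp) _ h0

set_option maxHeartbeats 2000000 in
theorem thread_has_handoff_started_py_spec : Claim_equal_thread_has_handoff_started_py := by
  intro ts _
  unfold Spec_thread_has_handoff_started_py
  cases ts with
  | none => rfl
  | some xs =>
    by_cases hxs : xs = []
    · subst hxs; rfl
    · simp only [thread_has_handoff_started_py, thread_has_handoff_started_py_alt,
        pvThreadToText, pvHandoffPhrases, if_neg hxs]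
      set msgs := PySem.List.slice xs (some (-(8 : Int))) none with hmsgs
      have hfun : (fun (lines : List String) (m : List (String × String)) =>
          let role := PySem.Str.lower (PySem.Str.strip (((PySem.Dict.mk m).get? "role").getD ""))
          let content := PySem.Str.strip (((PySem.Dict.mk m).get? "content").getD "")
          if content = "" then lines
          else
            let who := if role = "user" then "Customer" else "Patti"
            lines ++ [who ++ ": " ++ content]) =
          (fun lines m => if (!(pvCnt m == "")) = true then lines ++ [pvLine m] else lines) := by
        funext lines m
        by_cases h : pvCnt m = ""
        · simp [pvCnt] at h
          simp [h, pvCnt]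
        · simp only [pvCnt] at h
          simp [h, pvCnt, pvLine, pvWho, pvRole]
      rw [hfun, PySem.List.foldl_append_if, List.nil_append]
      set good := msgs.filter (fun m => !(pvCnt m == "")) with hgood
      have hmemgood : ∀ m, m ∈ good ↔ m ∈ msgs ∧ pvCnt m ≠ "" := by
        intro m
        rw [hgood, List.mem_filter]
        simp
      have hok : ∀ p ∈ pvHandoffPhrases, pvNeedleOK p.toList := by
        intro p hp
        obtain ⟨h1, h2, h3, h4, h5, h6⟩ := pv_phrases_ok p hp
        exact ⟨h1, h2, h3, h4, (PySem.Chars.isIn_eq_false_iff _ _).1 h5,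
          (PySem.Chars.isIn_eq_false_iff _ _).1 h6⟩
      cases hg : good with
      | nil =>
        rw [List.map_nil]
        rw [if_pos (by decide : PySem.Str.lower (PySem.Str.strip (PySem.Str.join "\n" [])) = "")]
        symm
        rw [List.any_eq_false]
        intro m hm
        have hc : pvCnt m = "" := by
          by_contra hc
          have : m ∈ good := (hmemgood m).2 ⟨hm, hc⟩
          rw [hg] at this
          exact absurd this (List.not_mem_nil)
        simp only [pvCnt] at hc
        rw [hc]
        have h0 : PySem.Str.lower "" = "" := rfl
        simp [h0]
      | cons g gs =>
        have hne' : ∀ m ∈ good, pvCnt m ≠ "" := fun m hm => ((hmemgood m).1 hm).2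
        obtain ⟨hT, hTne'⟩ := pv_transcript good hne'
        have hTne := hTne' (by rw [hg]; exact List.cons_ne_nil g gs)
        rw [hg] at hT hTne
        rw [if_neg hTne, Bool.eq_iff_iff, List.any_eq_true, List.any_eq_true]
        have hwl : ∀ pr ∈ (g :: gs).map (fun m => (PySem.Chars.lower ((pvWho m).toList),
            PySem.Chars.lower ((pvCnt m).toList))),
            pr.1 = "customer".toList ∨ pr.1 = "patti".toList := by
          intro pr hpr
          obtain ⟨m, _, hx⟩ := List.mem_map.1 hpr
          have h1 : pr.1 = PySem.Chars.lower ((pvWho m).toList) := by rw [← hx]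
          rw [h1]
          rcases pv_who_cases m with h | h <;> rw [h]
          · exact Or.inl (by decide)
          · exact Or.inr (by decide)
        constructor
        · rintro ⟨p, hp, hin⟩
          rw [PySem.Str.isIn_iff_infix, hT, pv_key p.toList (hok p hp) _ hwl] at hin
          obtain ⟨pr, hpr, hinf⟩ := hin
          obtain ⟨m, hmg, hx⟩ := List.mem_map.1 hpr
          have h2 : pr.2 = PySem.Chars.lower ((pvCnt m).toList) := by rw [← hx]
          rw [h2] at hinf
          obtain ⟨hmm, hcne⟩ := (hmemgood m).1 (by rw [hg]; exact hmg)
          refine ⟨m, hmm, ?_⟩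
          rw [Bool.and_eq_true, decide_eq_true_eq, List.any_eq_true]
          constructor
          · show PySem.Str.lower (pvCnt m) ≠ ""
            rw [Ne, pv_lower_eq_nil_iff]
            exact hcne
          · refine ⟨p, hp, ?_⟩
            show PySem.Str.isIn p (PySem.Str.lower (pvCnt m)) = true
            rw [PySem.Str.isIn_iff_infix, PySem.Str.toList_lower]
            exact hinf
        · rintro ⟨m, hmm, hf⟩
          rw [Bool.and_eq_true, decide_eq_true_eq, List.any_eq_true] at hf
          obtain ⟨hne2, p, hp, hin⟩ := hf
          have hcne : pvCnt m ≠ "" := fun h => hne2 ((pv_lower_eq_nil_iff (pvCnt m)).2 h)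
          refine ⟨p, hp, ?_⟩
          rw [PySem.Str.isIn_iff_infix, hT, pv_key p.toList (hok p hp) _ hwl]
          refine ⟨(PySem.Chars.lower ((pvWho m).toList), PySem.Chars.lower ((pvCnt m).toList)),
            List.mem_map.2 ⟨m, (by rw [← hg]; exact (hmemgood m).2 ⟨hmm, hcne⟩), rfl⟩, ?_⟩
          have hin' : PySem.Str.isIn p (PySem.Str.lower (pvCnt m)) = true := hin
          rw [PySem.Str.isIn_iff_infix, PySem.Str.toList_lower] at hin'
          exact hin'
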